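-- pv_equiv track=rewrite | github.com/youseop/Problem_solutions | BAEKJOON/11479_서로다른부분문자열의개수2(unsolved).py | to_int_keys2
-- ===== SOURCE A (Python) =====
-- def to_int_keys2(l):
--     """
--     l: iterable of keys
--     returns: a list with integer keys
--     """
--     cnt = 0
--     lastKey = None
--     index = {}
--     for key in sorted(l):
--         if key != lastKey:
--             index[key] = cnt
--             cnt += 1
--         lastKey = key
--     return [index[v] for v in l]
-- ===== SOURCE B (Python) =====
-- def to_int_keys2(l):
--     """
--     l: iterable of keys
--     returns: a list with integer keys
--     """
--     pairs = sorted(enumerate(l), key=lambda p: p[1])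
--     res = [0] * len(pairs)
--     rank = 0
--     prev = None
--     for i, v in pairs:
--         if prev is not None and v != prev:
--             rank += 1
--         res[i] = rank
--         prev = v
--     return res
-- ===== Notes on version B (the rewrite author's own statement) =====
-- stated objective: alternative
-- what changed: B sorts (index, value) pairs from enumerate(l) and fills the result positionally in one scan with a running rank counter, instead of building a value->rank dict over sorted(l) and doing a second lookup pass.
import Mathlib
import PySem

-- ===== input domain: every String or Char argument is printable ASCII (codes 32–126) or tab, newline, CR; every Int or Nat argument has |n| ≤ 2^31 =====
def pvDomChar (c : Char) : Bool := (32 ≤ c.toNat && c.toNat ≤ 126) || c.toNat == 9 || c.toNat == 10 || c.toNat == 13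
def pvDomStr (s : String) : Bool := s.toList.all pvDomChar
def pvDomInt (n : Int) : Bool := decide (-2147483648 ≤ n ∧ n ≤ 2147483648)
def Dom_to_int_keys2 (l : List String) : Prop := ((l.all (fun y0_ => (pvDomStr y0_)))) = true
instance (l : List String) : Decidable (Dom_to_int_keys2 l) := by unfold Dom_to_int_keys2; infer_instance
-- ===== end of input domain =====

-- B sorts (index, value) pairs from enumerate(l) and fills the result positionally in one scan
-- with a running rank counter, instead of A's value→rank dict over sorted(l) plus a second
-- lookup pass (objective: alternative decomposition, same O(n log n) cost).
-- Python's '<' on str is '<' on the code-point lists, so both sorts use '.toList' as the key.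

-- ===== PORT A =====
-- loop body: if key != lastKey: index[key] = cnt; cnt += 1;  lastKey = key
def stepA (st : Int × Option String × PySem.Dict String Int) (key : String) :
    Int × Option String × PySem.Dict String Int :=
  if some key ≠ st.2.1 then (st.1 + 1, some key, st.2.2.insert key st.1)
  else (st.1, some key, st.2.2)

-- In the final comprehension index[v] can never raise KeyError: every v ∈ l occurs in sorted(l),
-- hence is a key of index; '(get? v).getD 0' reads the present key, the default is a dead branch.
def to_int_keys2 (l : List String) : List Int :=
  let st := (PySem.List.sorted l (fun x => x.toList) false).foldl stepA (0, none, PySem.Dict.empty)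
  l.map (fun v => (st.2.2.get? v).getD 0)

-- ===== PORT B =====
-- loop body: if prev is not None and v != prev: rank += 1;  res[i] = rank;  prev = v
-- res[i] = rank is List.set at i.toNat: exact, since every i from enumerate(l) is 0 ≤ i < len(l).
def stepB (st : List Int × Int × Option String) (p : Int × String) :
    List Int × Int × Option String :=
  let rank := if st.2.2 ≠ none ∧ some p.2 ≠ st.2.2 then st.2.1 + 1 else st.2.1
  (st.1.set p.1.toNat rank, rank, some p.2)

def to_int_keys2_alt (l : List String) : List Int :=
  let pairs := PySem.List.sorted (PySem.List.enumerate l) (fun p => p.2.toList) false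
  (pairs.foldl stepB (List.replicate pairs.length (0 : Int), 0, none)).1

-- ===== PRECONDITION & SPEC =====
def Spec_to_int_keys2 (l : List String) (out : List Int) : Prop := out = to_int_keys2_alt l
instance (l : List String) (out : List Int) : Decidable (Spec_to_int_keys2 l out) := by unfold Spec_to_int_keys2; infer_instance

-- ===== CLAIM (what is proved, stated in full; the proofs are below) =====
def Claim_equal_to_int_keys2 : Prop := ∀ (l : List String), Dom_to_int_keys2 l → Spec_to_int_keys2 l (to_int_keys2 l)

-- ===== LEMMAS AND PROOFS =====

-- the common value: rank of v = number of distinct strings of s strictly below v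
def rk (s : List String) (v : String) : Int :=
  ((PySem.List.dedup s).countP (fun x => decide (x.toList < v.toList)) : Int)

lemma str_le_antisymm {a b : String} (h1 : a.toList ≤ b.toList) (h2 : b.toList ≤ a.toList) :
    a = b := String.toList_inj.mp (le_antisymm h1 h2)

lemma str_lt_of_le_ne {a b : String} (h1 : a.toList ≤ b.toList) (h2 : a ≠ b) :
    a.toList < b.toList :=
  lt_of_le_of_ne h1 (fun he => h2 (String.toList_inj.mp he))

lemma rk_congr (X Y : List String) (h : ∀ x, x ∈ X ↔ x ∈ Y) (v : String) : rk X v = rk Y v := by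
  unfold rk
  have hperm : (PySem.List.dedup X).Perm (PySem.List.dedup Y) := by
    rw [List.perm_ext_iff_of_nodup (by simp [PySem.Set.nodup_ofList]) (by simp [PySem.Set.nodup_ofList])]
    intro x
    simp [h x]
  rw [hperm.countP_eq]

lemma pairwise_getLast {α : Type} {R : α → α → Prop} {s : List α} (hs : s.Pairwise R)
    (h : s ≠ []) : ∀ y ∈ s, y = s.getLast h ∨ R y (s.getLast h) := by
  intro y hy
  have hsplit : s.dropLast ++ [s.getLast h] = s := List.dropLast_append_getLast h
  rw [← hsplit] at hs hy
  rcases List.mem_append.mp hy with h1 | h1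
  · exact Or.inr ((List.pairwise_append.mp hs).2.2 y h1 _ (List.mem_singleton_self _))
  · exact Or.inl (by simpa using h1)

lemma dedup_concat_mem (s : List String) (x : String) (h : x ∈ s) :
    PySem.List.dedup (s ++ [x]) = PySem.List.dedup s := by
  simp only [PySem.List.dedup_eq_ofList, PySem.Set.ofList_append_singleton]
  exact PySem.Set.add_of_mem ((PySem.Set.mem_ofList _ _).mpr h)

lemma dedup_concat_not_mem (s : List String) (x : String) (h : x ∉ s) :
    PySem.List.dedup (s ++ [x]) = PySem.List.dedup s ++ [x] := by
  simp only [PySem.List.dedup_eq_ofList, PySem.Set.ofList_append_singleton]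
  exact PySem.Set.add_of_not_mem (fun hc => h ((PySem.Set.mem_ofList _ _).mp hc))

-- all distinct values of s are strictly below a fresh upper bound x
lemma countP_dedup_all_lt (s : List String) (x : String) (hx : x ∉ s)
    (hall : ∀ a ∈ s, a.toList ≤ x.toList) :
    (PySem.List.dedup s).countP (fun y => decide (y.toList < x.toList)) =
      (PySem.List.dedup s).length := by
  apply List.countP_eq_length.mpr
  intro a ha
  have ha' : a ∈ s := (PySem.List.mem_dedup _ _).mp ha
  exact decide_eq_true (str_lt_of_le_ne (hall a ha') (fun he => hx (he ▸ ha')))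

-- v is the maximum of d (nodup): exactly one element (v itself) is not strictly below it
lemma countP_lt_max (d : List String) (hnd : d.Nodup) (v : String) (hv : v ∈ d)
    (hle : ∀ y ∈ d, y.toList ≤ v.toList) :
    d.countP (fun x => decide (x.toList < v.toList)) + 1 = d.length := by
  have h1 := List.length_eq_countP_add_countP (p := fun x => decide (x.toList < v.toList)) (l := d)
  have h2 : d.countP (fun a => decide ¬(decide (a.toList < v.toList) = true)) = d.count v := by
    rw [show d.count v = d.countP (fun x => x == v) from rfl]
    apply List.countP_congr
    intro x hx
    simp only [decide_eq_true_eq, beq_iff_eq, not_lt]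
    constructor
    · intro hge
      exact str_le_antisymm (hle x hx) hge
    · intro he
      subst he
      exact le_refl _
  rw [List.count_eq_one_of_mem hnd hv] at h2
  omega

lemma foldA_spec (s : List String) (hs : s.Pairwise (fun a b => a.toList ≤ b.toList)) :
    (s.foldl stepA ((0 : Int), (none : Option String), (PySem.Dict.empty : PySem.Dict String Int))).1
        = ((PySem.List.dedup s).length : Int) ∧
    (s.foldl stepA ((0 : Int), (none : Option String), (PySem.Dict.empty : PySem.Dict String Int))).2.1
        = s.getLast? ∧
    ∀ v ∈ s,
      (s.foldl stepA ((0 : Int), (none : Option String), (PySem.Dict.empty : PySem.Dict String Int))).2.2.get? v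
        = some (rk s v) := by
  induction s using List.reverseRecOn with
  | nil =>
    refine ⟨rfl, rfl, ?_⟩
    intro v hv
    simp at hv
  | append_singleton s x ih =>
    have hps := (List.pairwise_append.mp hs).1
    have hall : ∀ a ∈ s, a.toList ≤ x.toList := fun a ha =>
      (List.pairwise_append.mp hs).2.2 a ha x (List.mem_singleton_self x)
    obtain ⟨h1, h2, h3⟩ := ih hps
    rw [List.foldl_append, List.foldl_cons, List.foldl_nil]
    set st := s.foldl stepA ((0 : Int), (none : Option String), (PySem.Dict.empty : PySem.Dict String Int)) with hst
    by_cases hc : some x = st.2.1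
    · -- key == lastKey: dict and cnt unchanged
      have hsne : s ≠ [] := by
        intro hnil
        rw [hnil] at h2
        rw [h2] at hc
        simp at hc
      have hlast : s.getLast? = some (s.getLast hsne) := List.getLast?_eq_some_getLast hsne
      have hxs : x ∈ s := by
        have hx : x = s.getLast hsne := by
          have : some x = some (s.getLast hsne) := by rw [hc, h2, hlast]
          exact Option.some.inj this
        rw [hx]
        exact List.getLast_mem hsne
      have hded := dedup_concat_mem s x hxs
      rw [stepA, if_neg (by simpa using hc)]
      refine ⟨by rw [hded]; exact h1, by rw [List.getLast?_concat], ?_⟩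
      intro v hv
      have hv' : v ∈ s := by
        rcases List.mem_append.mp hv with h | h
        · exact h
        · have hvx : v = x := by simpa using h
          rw [hvx]; exact hxs
      have hrk : rk (s ++ [x]) v = rk s v := by unfold rk; rw [hded]
      rw [hrk]
      exact h3 v hv'
    · -- fresh key: insert with current cnt
      have hxns : x ∉ s := by
        intro hmem
        have hne : s ≠ [] := List.ne_nil_of_mem hmem
        have hgl_le : (s.getLast hne).toList ≤ x.toList := hall _ (List.getLast_mem hne)
        have hxeq : x = s.getLast hne := by
          rcases pairwise_getLast hps hne x hmem with h | h
          · exact h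
          · exact str_le_antisymm h hgl_le
        exact hc (by rw [h2, List.getLast?_eq_some_getLast hne, hxeq])
      have hded := dedup_concat_not_mem s x hxns
      rw [stepA, if_pos (by simpa using hc)]
      refine ⟨?_, by rw [List.getLast?_concat], ?_⟩
      · rw [hded, h1, List.length_append]
        push_cast [List.length_singleton]
        ring
      · intro v hv
        rcases List.mem_append.mp hv with hvs | hvx
        · have hvne : v ≠ x := fun he => hxns (he ▸ hvs)
          rw [PySem.Dict.get?_insert_of_ne _ _ hvne, h3 v hvs]
          congr 1
          unfold rk
          rw [hded, List.countP_append]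
          have : List.countP (fun y => decide (y.toList < v.toList)) [x] = 0 := by
            simp only [List.countP_cons, List.countP_nil]
            have : ¬ x.toList < v.toList := not_lt.mpr (hall v hvs)
            simp [this]
          omega
        · have hvx' : v = x := by simpa using hvx
          subst hvx'
          rw [PySem.Dict.get?_insert_self, h1]
          congr 1
          unfold rk
          rw [hded, List.countP_append, countP_dedup_all_lt s v hxns hall]
          have : List.countP (fun y => decide (y.toList < v.toList)) [v] = 0 := by
            simp
          omega

lemma foldB_spec (n : Nat) (q : List (Int × String))
    (hq : q.Pairwise (fun a b => a.2.toList ≤ b.2.toList))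
    (hnd : (q.map Prod.fst).Nodup)
    (hb : ∀ p ∈ q, 0 ≤ p.1 ∧ p.1.toNat < n) :
    (q.foldl stepB (List.replicate n (0 : Int), (0 : Int), (none : Option String))).1.length = n ∧
    (q.foldl stepB (List.replicate n (0 : Int), (0 : Int), (none : Option String))).2.2
      = q.getLast?.map Prod.snd ∧
    (q.foldl stepB (List.replicate n (0 : Int), (0 : Int), (none : Option String))).2.1 =
      (if q = [] then 0 else ((PySem.List.dedup (q.map Prod.snd)).length : Int) - 1) ∧
    ∀ p ∈ q, (q.foldl stepB (List.replicate n (0 : Int), (0 : Int), (none : Option String))).1[p.1.toNat]? =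
      some (rk (q.map Prod.snd) p.2) := by
  induction q using List.reverseRecOn with
  | nil =>
    refine ⟨by simp, rfl, by simp, ?_⟩
    intro p hp
    simp at hp
  | append_singleton q p ih =>
    have hq' := (List.pairwise_append.mp hq).1
    have hall : ∀ a ∈ q, a.2.toList ≤ p.2.toList := fun a ha =>
      (List.pairwise_append.mp hq).2.2 a ha p (List.mem_singleton_self p)
    rw [List.map_append] at hnd
    have hnd' := (List.nodup_append.mp hnd).1
    have hpfst : p.1 ∉ q.map Prod.fst := by
      intro hc
      exact (List.nodup_append.mp hnd).2.2 p.1 hc p.1 (List.mem_singleton_self _) rfl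
    have hb' : ∀ a ∈ q, 0 ≤ a.1 ∧ a.1.toNat < n := fun a ha => hb a (List.mem_append_left _ ha)
    have hp := hb p (List.mem_append_right _ (List.mem_singleton_self p))
    obtain ⟨hlen, hprev, hrank, hres⟩ := ih hq' hnd' hb'
    rw [List.foldl_append, List.foldl_cons, List.foldl_nil]
    set st := q.foldl stepB (List.replicate n (0 : Int), (0 : Int), (none : Option String)) with hst
    by_cases hqnil : q = []
    · subst hqnil
      have hstval : st = (List.replicate n (0 : Int), (0 : Int), (none : Option String)) := rfl
      rw [stepB, hstval]
      simp only [ne_eq, not_true_eq_false, false_and, if_false]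
      refine ⟨by simp, by simp, ?_, ?_⟩
      · have : PySem.List.dedup ((([] : List (Int × String)) ++ [p]).map Prod.snd) = [p.2] := by
          simp [PySem.List.dedup_eq_ofList, PySem.Set.ofList]
        rw [this]
        simp
      · intro p' hp'
        have hpp : p' = p := by simpa using hp'
        subst hpp
        rw [List.getElem?_set_self (by simpa using hp.2)]
        have : rk ((([] : List (Int × String)) ++ [p']).map Prod.snd) p'.2 = 0 := by
          unfold rk
          simp [PySem.List.dedup_eq_ofList, PySem.Set.ofList]
        rw [this]
    · have hw : q.getLast? = some (q.getLast hqnil) := List.getLast?_eq_some_getLast hqnil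
      set w := q.getLast hqnil with hwdef
      have hwmem : w ∈ q := List.getLast_mem hqnil
      have hprev' : st.2.2 = some w.2 := by rw [hprev, hw]; rfl
      have hw_le : w.2.toList ≤ p.2.toList := hall w hwmem
      -- index disjointness: p.1.toNat differs from every p'.1.toNat, p' ∈ q
      have hidx : ∀ p' ∈ q, p.1.toNat ≠ p'.1.toNat := by
        intro p' hp'mem hcontra
        have h0 : 0 ≤ p'.1 := (hb' p' hp'mem).1
        have h0' : 0 ≤ p.1 := hp.1
        have : p.1 = p'.1 := by omega
        exact hpfst (this ▸ List.mem_map_of_mem hp'mem)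
      by_cases hvw : p.2 = w.2
      · -- repeated value: rank unchanged
        rw [stepB, hprev']
        rw [if_neg (by simp [hvw])]
        have hvmem : p.2 ∈ q.map Prod.snd := hvw ▸ List.mem_map_of_mem hwmem
        have hded : PySem.List.dedup ((q ++ [p]).map Prod.snd) = PySem.List.dedup (q.map Prod.snd) := by
          rw [List.map_append]
          exact dedup_concat_mem _ _ hvmem
        refine ⟨by rw [List.length_set, hlen], by rw [List.getLast?_concat]; rfl, ?_, ?_⟩
        · rw [hded, hrank, if_neg hqnil, if_neg (by simp)]
        · intro p' hp'
          rcases List.mem_append.mp hp' with hmem | hmem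
          · rw [List.getElem?_set_ne (hidx p' hmem), hres p' hmem]
            congr 1
            unfold rk
            rw [hded]
          · have hpp : p' = p := by simpa using hmem
            subst hpp
            rw [List.getElem?_set_self (by rw [hlen]; exact hp.2)]
            congr 1
            have hd := countP_lt_max (PySem.List.dedup (q.map Prod.snd))
              (by simp [PySem.Set.nodup_ofList]) p'.2 ((PySem.List.mem_dedup _ _).mpr hvmem)
              (fun y hy => by
                obtain ⟨a, ha, hay⟩ := List.mem_map.mp ((PySem.List.mem_dedup _ _).mp hy)
                exact hay ▸ hall a ha)
            unfold rk
            rw [hded, hrank, if_neg hqnil]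
            omega
      · -- fresh value: rank increments
        rw [stepB, hprev']
        rw [if_pos (by simp [hvw])]
        have hnotmem : p.2 ∉ q.map Prod.snd := by
          intro hmem
          obtain ⟨a, ha, hav⟩ := List.mem_map.mp hmem
          rcases pairwise_getLast hq' hqnil a ha with he | hle
          · exact hvw (by rw [← hav, he])
          · have h1 : p.2.toList ≤ w.2.toList := hav ▸ hle
            exact hvw (str_le_antisymm hw_le h1).symm
        have hded : PySem.List.dedup ((q ++ [p]).map Prod.snd)
            = PySem.List.dedup (q.map Prod.snd) ++ [p.2] := by
          rw [List.map_append]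
          exact dedup_concat_not_mem _ _ hnotmem
        refine ⟨by rw [List.length_set, hlen], by rw [List.getLast?_concat]; rfl, ?_, ?_⟩
        · rw [hded, hrank, if_neg hqnil, if_neg (by simp)]
          push_cast [List.length_append, List.length_singleton]
          ring
        · intro p' hp'
          rcases List.mem_append.mp hp' with hmem | hmem
          · rw [List.getElem?_set_ne (hidx p' hmem), hres p' hmem]
            congr 1
            unfold rk
            rw [hded, List.countP_append]
            have hnl : ¬ p.2.toList < p'.2.toList := not_lt.mpr (hall p' hmem)
            have : List.countP (fun y => decide (y.toList < p'.2.toList)) [p.2] = 0 := by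
              simp [hnl]
            omega
          · have hpp : p' = p := by simpa using hmem
            subst hpp
            rw [List.getElem?_set_self (by rw [hlen]; exact hp.2)]
            congr 1
            unfold rk
            rw [hded, List.countP_append]
            have hlt := countP_dedup_all_lt (q.map Prod.snd) p'.2 hnotmem
              (fun a ha => by
                obtain ⟨b, hb2, hba⟩ := List.mem_map.mp ha
                exact hba ▸ hall b hb2)
            have h0 : List.countP (fun y => decide (y.toList < p'.2.toList)) [p'.2] = 0 := by
              simp
            rw [hrank, if_neg hqnil]
            omega

lemma a_eq (l : List String) : to_int_keys2 l = l.map (fun v => rk l v) := by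
  unfold to_int_keys2
  obtain ⟨-, -, h3⟩ := foldA_spec (PySem.List.sorted l (fun x => x.toList) false)
    (by convert PySem.List.sorted_pairwise l (fun x => x.toList) using 2)
  apply List.map_congr_left
  intro v hv
  have hvmem : v ∈ PySem.List.sorted l (fun x => x.toList) false :=
    (PySem.List.mem_sorted _ _ _ _).mpr hv
  rw [h3 v hvmem]
  simp only [Option.getD_some]
  exact rk_congr _ _ (fun x => PySem.List.mem_sorted _ _ _ _) v

lemma b_eq (l : List String) : to_int_keys2_alt l = l.map (fun v => rk l v) := by
  unfold to_int_keys2_alt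
  have hperm : (PySem.List.sorted (PySem.List.enumerate l) (fun p => p.2.toList) false).Perm
      (PySem.List.enumerate l) := PySem.List.sorted_perm _ _ _
  set ps := PySem.List.sorted (PySem.List.enumerate l) (fun p => p.2.toList) false with hpsdef
  have hpslen : ps.length = l.length := by
    rw [PySem.List.length_sorted, PySem.List.length_enumerate]
  have hq : ps.Pairwise (fun a b => a.2.toList ≤ b.2.toList) := by
    rw [hpsdef]
    convert PySem.List.sorted_pairwise (PySem.List.enumerate l) (fun p => p.2.toList) using 2
  have hchar : ∀ p ∈ ps, ∃ (k : Nat) (_ : k < l.length), p = ((k : Int), l[k]) := by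
    intro p hp
    have hp' : p ∈ PySem.List.enumerate l :=
      (PySem.List.mem_sorted _ _ _ _).mp hp
    obtain ⟨k, hk, hpe⟩ := (PySem.List.mem_enumerate_iff l 0 p).mp hp'
    exact ⟨k, hk, by simpa using hpe⟩
  have hnd : (ps.map Prod.fst).Nodup := by
    have hpm : (ps.map Prod.fst).Perm ((PySem.List.enumerate l).map Prod.fst) := hperm.map _
    rw [hpm.nodup_iff]
    rw [show (PySem.List.enumerate l).map Prod.fst
        = List.map (fun x => x.1) (PySem.List.enumerate l) from rfl,
      PySem.List.map_fst_enumerate]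
    exact PySem.List.nodup_pyRange_one _ _
  have hb : ∀ p ∈ ps, 0 ≤ p.1 ∧ p.1.toNat < l.length := by
    intro p hp
    obtain ⟨k, hk, rfl⟩ := hchar p hp
    constructor
    · exact Int.natCast_nonneg k
    · simpa using hk
  obtain ⟨hlen, -, -, hres⟩ := foldB_spec l.length ps hq hnd hb
  have hsnd : ∀ x, x ∈ ps.map Prod.snd ↔ x ∈ l := by
    intro x
    have hpm : (ps.map Prod.snd).Perm l := by
      have h1 : (ps.map Prod.snd).Perm ((PySem.List.enumerate l).map Prod.snd) := hperm.map _
      rw [show (PySem.List.enumerate l).map Prod.snd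
          = List.map (fun x => x.2) (PySem.List.enumerate l) from rfl,
        PySem.List.map_snd_enumerate] at h1
      exact h1
    exact hpm.mem_iff
  show (List.foldl stepB (List.replicate ps.length 0, 0, none) ps).1
      = List.map (fun v => rk l v) l
  rw [hpslen]
  apply List.ext_getElem?
  intro j
  by_cases hj : j < l.length
  · have hjmem : ((j : Int)) ∈ ps.map Prod.fst := by
      have hpm : (ps.map Prod.fst).Perm ((PySem.List.enumerate l).map Prod.fst) := hperm.map _
      rw [hpm.mem_iff]
      rw [show (PySem.List.enumerate l).map Prod.fst
          = List.map (fun x => x.1) (PySem.List.enumerate l) from rfl,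
        PySem.List.map_fst_enumerate]
      rw [PySem.List.mem_pyRange_one]
      constructor
      · exact Int.natCast_nonneg j
      · omega
    obtain ⟨p, hpmem, hpfst⟩ := List.mem_map.mp hjmem
    obtain ⟨k, hk, rfl⟩ := hchar p hpmem
    have hkj : k = j := by simpa using hpfst
    subst hkj
    have hr := hres _ hpmem
    simp only [Int.toNat_natCast] at hr
    rw [hr, List.getElem?_map, List.getElem?_eq_getElem hj]
    simp only [Option.map_some]
    congr 1
    exact rk_congr _ _ hsnd _
  · rw [List.getElem?_eq_none (by rw [hlen]; omega),
      List.getElem?_eq_none (by rw [List.length_map]; omega)]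

-- ===== VERDICT (by name: the statement is the Claim_ definition above) =====
theorem to_int_keys2_spec : Claim_equal_to_int_keys2 := by
  intro l _
  unfold Spec_to_int_keys2
  rw [a_eq, b_eq]
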